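-- pv_equiv track=rewrite | github.com/MatALass/repo_auditor | scripts/build_batch_summary.py | has_structure_debt_signal
-- ===== SOURCE A (Python) =====
-- from typing import Any
--
-- def issue_title_text(repo: dict[str, Any]) -> str:
--     return " | ".join(
--         str(issue.get("title", "")).strip().lower()
--         for issue in repo.get("priority_issues", [])
--     )
--
-- def action_title_text(repo: dict[str, Any]) -> str:
--     return " | ".join(
--         str(action.get("title", "")).strip().lower()
--         for action in repo.get("prioritized_actions", [])
--     )
--
-- def has_structure_debt_signal(repo: dict[str, Any]) -> bool:
--     text = issue_title_text(repo)
--     action_text = action_title_text(repo)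
--     return any(
--         fragment in text or fragment in action_text
--         for fragment in [
--             "monolithic structure",
--             "poor separation of concerns",
--             "main code directory missing",
--             "flat project structure",
--             "dedicated source directory",
--             "decompose monolithic code structure",
--             "improve separation of concerns",
--         ]
--     )
-- ===== SOURCE B (Python) =====
-- FRAGMENTS = (
--     "monolithic structure",
--     "poor separation of concerns",
--     "main code directory missing",
--     "flat project structure",
--     "dedicated source directory",
--     "decompose monolithic code structure",
--     "improve separation of concerns",
-- )
--
-- def has_structure_debt_signal(repo):
--     for key in ("priority_issues", "prioritized_actions"):
--         for entry in repo.get(key, []):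
--             title = str(entry.get("title", "")).strip().lower()
--             if any(fragment in title for fragment in FRAGMENTS):
--                 return True
--     return False
-- ===== Notes on version B (the rewrite author's own statement) =====
-- stated objective: simpler
-- what changed: B drops the two string-joining helpers and the joined-text scan: it walks the two entry lists directly, normalises each title once and tests the 7 fragments against that single title, returning on the first hit; this is equivalent because no fragment contains '|' or starts/ends with a space, so no match can span a ' | ' join boundary (proved as pv_infix_join).
import Mathlib
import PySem

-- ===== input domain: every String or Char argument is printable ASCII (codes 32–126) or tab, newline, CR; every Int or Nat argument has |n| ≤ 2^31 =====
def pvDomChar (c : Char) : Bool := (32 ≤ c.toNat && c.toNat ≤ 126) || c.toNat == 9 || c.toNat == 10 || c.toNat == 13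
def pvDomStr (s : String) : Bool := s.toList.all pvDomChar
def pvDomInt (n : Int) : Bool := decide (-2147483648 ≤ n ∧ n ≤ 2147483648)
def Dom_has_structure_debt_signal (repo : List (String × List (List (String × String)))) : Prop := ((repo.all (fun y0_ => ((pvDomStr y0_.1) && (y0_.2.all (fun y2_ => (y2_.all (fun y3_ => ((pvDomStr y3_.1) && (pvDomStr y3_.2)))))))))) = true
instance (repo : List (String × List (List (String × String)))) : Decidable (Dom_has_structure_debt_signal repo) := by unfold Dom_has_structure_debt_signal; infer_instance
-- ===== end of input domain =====

-- B scans each title individually as it traverses the two entry lists (returning on the first hit)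
-- instead of A's build-two-joined-strings-then-scan; equivalent because no fragment contains '|',
-- starts or ends with ' ', so no match can span a " | " join boundary. Objective: simpler.

-- the 7 keyword fragments (shared literal list of both Pythons)
def pvFragments : List (List Char) :=
  ["monolithic structure".toList,
   "poor separation of concerns".toList,
   "main code directory missing".toList,
   "flat project structure".toList,
   "dedicated source directory".toList,
   "decompose monolithic code structure".toList,
   "improve separation of concerns".toList]

-- str(entry.get("title", "")).strip().lower()  (shared by both Pythons)
def pvTitleNorm (entry : List (String × String)) : List Char :=
  PySem.Chars.lower (PySem.Chars.strip (PySem.Dict.getD (PySem.Dict.mk entry) "title" "").toList)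

-- ===== PORT A =====
def issue_title_text (repo : List (String × List (List (String × String)))) : List Char :=
  PySem.Chars.join [' ', '|', ' ']
    ((PySem.Dict.getD (PySem.Dict.mk repo) "priority_issues" []).map pvTitleNorm)

def action_title_text (repo : List (String × List (List (String × String)))) : List Char :=
  PySem.Chars.join [' ', '|', ' ']
    ((PySem.Dict.getD (PySem.Dict.mk repo) "prioritized_actions" []).map pvTitleNorm)

def has_structure_debt_signal (repo : List (String × List (List (String × String)))) : Bool :=
  pvFragments.any (fun fragment =>
    PySem.Chars.isIn fragment (issue_title_text repo) ||
    PySem.Chars.isIn fragment (action_title_text repo))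

-- ===== PORT B =====
def has_structure_debt_signal_alt (repo : List (String × List (List (String × String)))) : Bool :=
  ["priority_issues", "prioritized_actions"].any (fun key =>
    (PySem.Dict.getD (PySem.Dict.mk repo) key []).any (fun entry =>
      pvFragments.any (fun fragment => PySem.Chars.isIn fragment (pvTitleNorm entry))))

-- ===== PRECONDITION & SPEC =====
def Spec_has_structure_debt_signal (repo : List (String × List (List (String × String)))) (out : Bool) : Prop := out = has_structure_debt_signal_alt repo
instance (repo : List (String × List (List (String × String)))) (out : Bool) : Decidable (Spec_has_structure_debt_signal repo out) := by unfold Spec_has_structure_debt_signal; infer_instance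

-- ===== CLAIM (what is proved, stated in full; the proofs are below) =====
def Claim_equal_has_structure_debt_signal : Prop := ∀ (repo : List (String × List (List (String × String)))), Dom_has_structure_debt_signal repo → Spec_has_structure_debt_signal repo (has_structure_debt_signal repo)

-- ===== LEMMAS AND PROOFS =====

-- an infix of an append is an infix of a side or spans the boundary
theorem pv_infix_append_cases {frag a b : List Char} (h : frag <:+: a ++ b) :
    frag <:+: a ∨ frag <:+: b ∨
      ∃ f1 f2, frag = f1 ++ f2 ∧ f1 ≠ [] ∧ f2 ≠ [] ∧ f1 <:+ a ∧ f2 <+: b := by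
  induction a with
  | nil => exact Or.inr (Or.inl (by simpa using h))
  | cons x a' ih =>
    rcases List.infix_cons_iff.mp h with hp | hi
    · obtain ⟨t, ht⟩ := hp
      have ht' : frag ++ t = (x :: a') ++ b := by simpa using ht
      rcases List.append_eq_append_iff.mp ht' with ⟨k, hk1, hk2⟩ | ⟨k, hk1, hk2⟩
      · exact Or.inl (List.IsPrefix.isInfix ⟨k, hk1.symm⟩)
      · rcases k.eq_nil_or_concat with rfl | hne
        · exact Or.inl (by simp [hk1] : frag <+: x :: a').isInfix
        · refine Or.inr (Or.inr ⟨x :: a', k, hk1, by simp, ?_, List.suffix_refl _, ⟨t, hk2.symm⟩⟩)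
          rcases hne with ⟨l', c, rfl⟩; simp
    · rcases ih hi with h1 | h2 | ⟨f1, f2, rfl, hf1, hf2, hs, hpb⟩
      · exact Or.inl (List.infix_cons h1)
      · exact Or.inr (Or.inl h2)
      · exact Or.inr (Or.inr ⟨f1, f2, rfl, hf1, hf2, hs.trans (List.suffix_cons x a'), hpb⟩)

-- a fragment with no '|' that does not start with ' ' cannot start inside the separator
theorem pv_infix_sep_right {frag b : List Char} (hne : frag ≠ []) (hpipe : '|' ∉ frag)
    (hhead : frag.head? ≠ some ' ') (h : frag <:+: ' ' :: '|' :: ' ' :: b) :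
    frag <:+: b := by
  rcases List.infix_cons_iff.mp h with hp | h
  · rcases List.prefix_cons_iff.mp hp with rfl | ⟨t, rfl, _⟩
    · exact absurd rfl hne
    · simp at hhead
  rcases List.infix_cons_iff.mp h with hp | h
  · rcases List.prefix_cons_iff.mp hp with rfl | ⟨t, rfl, _⟩
    · exact absurd rfl hne
    · simp at hpipe
  rcases List.infix_cons_iff.mp h with hp | h
  · rcases List.prefix_cons_iff.mp hp with rfl | ⟨t, rfl, _⟩
    · exact absurd rfl hne
    · simp at hhead
  · exact h

-- no fragment occurrence can span the " | " boundary
theorem pv_infix_join_boundary {frag a b : List Char} (hne : frag ≠ []) (hpipe : '|' ∉ frag)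
    (hhead : frag.head? ≠ some ' ') (hlast : frag.getLast? ≠ some ' ')
    (h : frag <:+: a ++ (' ' :: '|' :: ' ' :: b)) :
    frag <:+: a ∨ frag <:+: b := by
  rcases pv_infix_append_cases h with h1 | h2 | ⟨f1, f2, rfl, hf1, hf2, hs, hpb⟩
  · exact Or.inl h1
  · exact Or.inr (pv_infix_sep_right hne hpipe hhead h2)
  · exfalso
    rcases List.prefix_cons_iff.mp hpb with rfl | ⟨t, rfl, ht⟩
    · exact hf2 rfl
    rcases List.prefix_cons_iff.mp ht with rfl | ⟨t', rfl, _⟩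
    · simp [List.getLast?_append] at hlast
    · simp at hpipe

-- a fragment is in the " | "-join iff it is in one of the parts
theorem pv_infix_join {frag : List Char} (hne : frag ≠ []) (hpipe : '|' ∉ frag)
    (hhead : frag.head? ≠ some ' ') (hlast : frag.getLast? ≠ some ' ')
    (parts : List (List Char)) :
    frag <:+: PySem.Chars.join [' ', '|', ' '] parts ↔ ∃ p ∈ parts, frag <:+: p := by
  induction parts with
  | nil =>
    rw [PySem.Chars.join_nil]
    simp [List.infix_nil, hne]
  | cons p rest ih =>
    cases rest with
    | nil => rw [PySem.Chars.join_singleton]; simp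
    | cons q rest' =>
      rw [PySem.Chars.join_cons_cons]
      constructor
      · intro h
        have h' : frag <:+: p ++ (' ' :: '|' :: ' ' :: PySem.Chars.join [' ', '|', ' '] (q :: rest')) := by
          simpa [List.append_assoc] using h
        rcases pv_infix_join_boundary hne hpipe hhead hlast h' with h1 | h2
        · exact ⟨p, List.mem_cons_self, h1⟩
        · obtain ⟨r, hr, hfr⟩ := ih.mp h2
          exact ⟨r, List.mem_cons_of_mem _ hr, hfr⟩
      · rintro ⟨r, hr, hfr⟩
        rcases List.mem_cons.mp hr with rfl | hr'
        · exact hfr.trans (by simpa [List.append_assoc] using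
            (List.prefix_append r ([' ', '|', ' '] ++ PySem.Chars.join [' ', '|', ' '] (q :: rest'))).isInfix)
        · exact (ih.mpr ⟨r, hr', hfr⟩).trans (List.suffix_append _ _).isInfix

-- every fragment is nonempty, '|'-free, and neither starts nor ends with a space
theorem pv_frag_ok : ∀ f ∈ pvFragments,
    f ≠ [] ∧ '|' ∉ f ∧ f.head? ≠ some ' ' ∧ f.getLast? ≠ some ' ' := by decide

-- ===== VERDICT (by name: the statement is the Claim_ definition above) =====
theorem has_structure_debt_signal_spec : Claim_equal_has_structure_debt_signal := by
  intro repo _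
  unfold Spec_has_structure_debt_signal
  rw [Bool.eq_iff_iff]
  simp only [has_structure_debt_signal, has_structure_debt_signal_alt,
    issue_title_text, action_title_text, List.any_cons, List.any_nil,
    List.any_eq_true, Bool.or_eq_true, PySem.Chars.isIn_iff_infix, Bool.false_eq_true,
    or_false]
  constructor
  · rintro ⟨f, hf, hcase⟩
    obtain ⟨hne, hpipe, hhead, hlast⟩ := pv_frag_ok f hf
    rcases hcase with h | h
    · obtain ⟨p, hp, hfp⟩ := (pv_infix_join hne hpipe hhead hlast _).mp h
      rw [List.mem_map] at hp; obtain ⟨e, he, rfl⟩ := hp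
      exact Or.inl ⟨e, he, f, hf, hfp⟩
    · obtain ⟨p, hp, hfp⟩ := (pv_infix_join hne hpipe hhead hlast _).mp h
      rw [List.mem_map] at hp; obtain ⟨e, he, rfl⟩ := hp
      exact Or.inr ⟨e, he, f, hf, hfp⟩
  · rintro (⟨e, he, f, hf, hfp⟩ | ⟨e, he, f, hf, hfp⟩) <;>
      obtain ⟨hne, hpipe, hhead, hlast⟩ := pv_frag_ok f hf
    · exact ⟨f, hf, Or.inl ((pv_infix_join hne hpipe hhead hlast _).mpr
        ⟨pvTitleNorm e, List.mem_map_of_mem he, hfp⟩)⟩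
    · exact ⟨f, hf, Or.inr ((pv_infix_join hne hpipe hhead hlast _).mpr
        ⟨pvTitleNorm e, List.mem_map_of_mem he, hfp⟩)⟩
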